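-- pv_equiv track=rewrite | github.com/DabrowskiFr/Kairos | scripts/regenerate_bad_code_suite.py | split_node_blocks
-- ===== SOURCE A (Python) =====
-- def split_node_blocks(src: str) -> list[str]:
--     lines = src.splitlines(keepends=True)
--     blocks: list[str] = []
--     current: list[str] = []
--     for line in lines:
--         if line.startswith("node ") and current:
--             blocks.append("".join(current))
--             current = [line]
--         else:
--             current.append(line)
--     if current:
--         blocks.append("".join(current))
--     return blocks
-- ===== SOURCE B (Python) =====
-- def split_node_blocks(src: str) -> list[str]:
--     lines = src.splitlines(keepends=True)
--     blocks: list[str] = []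
--     n = len(lines)
--     i = 0
--     while i < n:
--         j = i + 1
--         while j < n and not lines[j].startswith("node "):
--             j += 1
--         blocks.append("".join(lines[i:j]))
--         i = j
--     return blocks
-- ===== Notes on version B (the rewrite author's own statement) =====
-- stated objective: alternative
-- what changed: B finds each block's end index with an inner scan and slices/joins lines[i:j] in one step, instead of folding over the lines while threading an accumulator list of the block in progress.
import Mathlib
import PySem

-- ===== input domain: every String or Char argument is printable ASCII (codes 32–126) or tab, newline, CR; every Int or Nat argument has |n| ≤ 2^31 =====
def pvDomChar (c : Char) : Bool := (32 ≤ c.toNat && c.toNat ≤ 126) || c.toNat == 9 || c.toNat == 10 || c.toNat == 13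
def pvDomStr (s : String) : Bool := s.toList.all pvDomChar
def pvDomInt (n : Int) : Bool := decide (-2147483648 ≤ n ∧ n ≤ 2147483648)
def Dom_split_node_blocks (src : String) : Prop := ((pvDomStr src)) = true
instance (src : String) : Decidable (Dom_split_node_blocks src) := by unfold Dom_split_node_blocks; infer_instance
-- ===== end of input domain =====

-- B replaces A's fold with a threaded accumulator of the block in progress by a two-index scan that
-- slices and joins lines[i:j] per block; same cost, different decomposition.

-- shared helper: src.splitlines(keepends=True), hand port (exact on the ASCII domain,
-- where the only line breaks are '\n', '\r' and '\r\n')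
def pvSplitKeep (acc : List Char) : List Char → List (List Char)
  | [] => if acc.isEmpty then [] else [acc.reverse]
  | '\r' :: '\n' :: rest => (acc.reverse ++ ['\r', '\n']) :: pvSplitKeep [] rest
  | '\r' :: rest => (acc.reverse ++ ['\r']) :: pvSplitKeep [] rest
  | '\n' :: rest => (acc.reverse ++ ['\n']) :: pvSplitKeep [] rest
  | c :: rest => pvSplitKeep (c :: acc) rest

def pvIsNode (l : List Char) : Bool := PySem.Chars.startswith l "node ".toList

-- ===== PORT A =====
-- one step of A's loop: state = (blocks as joined char lists, current lines)
def pvStepA (st : List (List Char) × List (List Char)) (line : List Char) :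
    List (List Char) × List (List Char) :=
  if pvIsNode line && !st.2.isEmpty then (st.1 ++ [st.2.flatten], [line])
  else (st.1, st.2 ++ [line])

def split_node_blocks (src : String) : List String :=
  let lines := pvSplitKeep [] src.toList
  let st := lines.foldl pvStepA ([], [])
  (if st.2.isEmpty then st.1 else st.1 ++ [st.2.flatten]).map String.mk

-- ===== PORT B =====
-- inner while loop: advance j while j < n and not lines[j].startswith("node ")
def pvFindEnd (lines : List (List Char)) (n j : Nat) : Nat :=
  if h : j < n ∧ ¬ (pvIsNode (lines.getD j []) = true) then pvFindEnd lines n (j + 1)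
  else j
termination_by n - j
decreasing_by omega

theorem pvFindEnd_ge (lines : List (List Char)) (n j : Nat) : j ≤ pvFindEnd lines n j := by
  unfold pvFindEnd
  split
  · exact le_trans (by omega) (pvFindEnd_ge lines n (j + 1))
  · exact le_refl j
termination_by n - j
decreasing_by omega

-- outer while loop; ''.join(lines[i:j]) = flatten of the slice
def pvBuildB (lines : List (List Char)) (n i : Nat) : List String :=
  if h : i < n then
    String.mk ((lines.drop i).take (pvFindEnd lines n (i + 1) - i)).flatten ::
      pvBuildB lines n (pvFindEnd lines n (i + 1))
  else []
termination_by n - i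
decreasing_by have := pvFindEnd_ge lines n (i + 1); omega

def split_node_blocks_alt (src : String) : List String :=
  let lines := pvSplitKeep [] src.toList
  pvBuildB lines lines.length 0

-- ===== PRECONDITION & SPEC =====
def Spec_split_node_blocks (src : String) (out : List String) : Prop := out = split_node_blocks_alt src
instance (src : String) (out : List String) : Decidable (Spec_split_node_blocks src out) := by unfold Spec_split_node_blocks; infer_instance

-- ===== CLAIM (what is proved, stated in full; the proofs are below) =====
def Claim_equal_split_node_blocks : Prop := ∀ (src : String), Dom_split_node_blocks src → Spec_split_node_blocks src (split_node_blocks src)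

-- ===== LEMMAS AND PROOFS =====

-- common reference form: blocks of lines, each already flattened
def blocksRec : List (List Char) → List (List Char)
  | [] => []
  | l :: rest =>
    (l ++ (rest.takeWhile (fun x => !pvIsNode x)).flatten) ::
      blocksRec (rest.dropWhile (fun x => !pvIsNode x))
termination_by l => l.length
decreasing_by
  have := List.length_dropWhile_le (fun x => !pvIsNode x) rest
  simp; omega

theorem foldA_eq (lines : List (List Char)) :
    ∀ (blocks cur : List (List Char)), cur ≠ [] →
    (let st := lines.foldl pvStepA (blocks, cur)
     if st.2.isEmpty then st.1 else st.1 ++ [st.2.flatten]) =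
    blocks ++ ((cur.flatten ++ (lines.takeWhile (fun x => !pvIsNode x)).flatten) ::
      blocksRec (lines.dropWhile (fun x => !pvIsNode x))) := by
  induction lines with
  | nil =>
    intro blocks cur hcur
    simp [List.isEmpty_iff, hcur, blocksRec]
  | cons l rest ih =>
    intro blocks cur hcur
    by_cases hn : pvIsNode l = true
    · have hstep : pvStepA (blocks, cur) l = (blocks ++ [cur.flatten], [l]) := by
        simp [pvStepA, hn, hcur]
      rw [List.foldl_cons, hstep, ih (blocks ++ [cur.flatten]) [l] (by simp)]
      rw [List.takeWhile_cons, List.dropWhile_cons]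
      simp [hn, blocksRec]
    · have hstep : pvStepA (blocks, cur) l = (blocks, cur ++ [l]) := by
        simp [pvStepA, hn]
      rw [List.foldl_cons, hstep, ih blocks (cur ++ [l]) (by simp)]
      rw [List.takeWhile_cons, List.dropWhile_cons]
      simp [hn]

theorem portA_eq (src : String) :
    split_node_blocks src = (blocksRec (pvSplitKeep [] src.toList)).map String.mk := by
  unfold split_node_blocks
  cases hls : pvSplitKeep [] src.toList with
  | nil => simp [blocksRec]
  | cons l rest =>
    have hstep : pvStepA ([], []) l = ([], [l]) := by simp [pvStepA]
    simp only [List.foldl_cons, hstep]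
    rw [foldA_eq rest [] [l] (by simp)]
    simp [blocksRec]

theorem pvFindEnd_eq (lines : List (List Char)) (n j : Nat)
    (hn : n = lines.length) (hj : j ≤ n) :
    pvFindEnd lines n j = j + ((lines.drop j).takeWhile (fun x => !pvIsNode x)).length := by
  unfold pvFindEnd
  split
  · rename_i h
    have hjlt : j < lines.length := hn ▸ h.1
    have hdrop : lines.drop j = lines[j] :: lines.drop (j + 1) :=
      List.drop_eq_getElem_cons hjlt
    have hget : lines.getD j [] = lines[j] := List.getD_eq_getElem lines [] hjlt
    rw [pvFindEnd_eq lines n (j + 1) hn (by omega), hdrop, List.takeWhile_cons]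
    have : (!pvIsNode lines[j]) = true := by
      rw [← hget]; simp only [Bool.not_eq_true']
      exact Bool.not_eq_true _ ▸ (by simpa using h.2)
    rw [this]
    simp; omega
  · rename_i h
    rcases Nat.lt_or_ge j n with hlt | hge
    · have hjlt : j < lines.length := hn ▸ hlt
      have hdrop : lines.drop j = lines[j] :: lines.drop (j + 1) :=
        List.drop_eq_getElem_cons hjlt
      have hget : lines.getD j [] = lines[j] := List.getD_eq_getElem lines [] hjlt
      have hnode : pvIsNode lines[j] = true := by
        by_contra hc
        exact h ⟨hlt, by rw [hget]; exact hc⟩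
      rw [hdrop, List.takeWhile_cons]
      simp [hnode]
    · have : lines.drop j = [] := List.drop_eq_nil_of_le (by omega)
      simp [this]
termination_by n - j
decreasing_by omega

theorem takeWhile_eq_take (p : List Char → Bool) (l : List (List Char)) :
    l.takeWhile p = l.take (l.takeWhile p).length :=
  List.prefix_iff_eq_take.mp (List.takeWhile_prefix p)

theorem drop_takeWhile_length (p : List Char → Bool) (l : List (List Char)) :
    l.drop (l.takeWhile p).length = l.dropWhile p := by
  nth_rewrite 2 [← List.takeWhile_append_dropWhile (p := p) (l := l)]
  exact List.drop_left

theorem buildB_eq (lines : List (List Char)) (i : Nat) :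
    pvBuildB lines lines.length i = (blocksRec (lines.drop i)).map String.mk := by
  unfold pvBuildB
  split
  · rename_i h
    have hdrop : lines.drop i = lines[i] :: lines.drop (i + 1) :=
      List.drop_eq_getElem_cons h
    set t := ((lines.drop (i + 1)).takeWhile (fun x => !pvIsNode x)).length with ht
    have hfe : pvFindEnd lines lines.length (i + 1) = (i + 1) + t :=
      pvFindEnd_eq lines lines.length (i + 1) rfl (by omega)
    rw [hfe, buildB_eq lines ((i + 1) + t)]
    have hslice : (lines.drop i).take ((i + 1) + t - i) =
        lines[i] :: (lines.drop (i + 1)).takeWhile (fun x => !pvIsNode x) := by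
      rw [hdrop]
      have : (i + 1) + t - i = t + 1 := by omega
      rw [this, List.take_succ_cons]
      congr 1
      rw [ht, ← takeWhile_eq_take]
    have hdroprest : lines.drop ((i + 1) + t) =
        (lines.drop (i + 1)).dropWhile (fun x => !pvIsNode x) := by
      rw [← List.drop_drop, ht, drop_takeWhile_length]
    rw [hslice, hdroprest]
    conv_rhs => rw [hdrop, blocksRec]
    simp
  · rename_i h
    have : lines.drop i = [] := List.drop_eq_nil_of_le (by omega)
    simp [this, blocksRec]
termination_by lines.length - i
decreasing_by have := pvFindEnd_ge lines lines.length (i + 1); omega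

-- ===== VERDICT (by name: the statement is the Claim_ definition above) =====
theorem split_node_blocks_spec : Claim_equal_split_node_blocks := by
  intro src _
  show split_node_blocks src = split_node_blocks_alt src
  rw [portA_eq]
  unfold split_node_blocks_alt
  rw [buildB_eq (pvSplitKeep [] src.toList) 0]
  simp
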